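-- pv_equiv track=rewrite | github.com/TomoyaFujita2016/Route_searching_2D | explore.py | calcrouteValue
-- ===== SOURCE A (Python) =====
-- def pickMinRouteValue(routeValue, y, x):
--     numbers = []
--     idx = 0
--     if 0 < y:
--         numbers.append(routeValue[y-1][x][2])
--     if 0 < x:
--         numbers.append(routeValue[y][x-1][0])
--     if 0 < x and 0 < y:
--         numbers.append(routeValue[y-1][x-1][1])
--     numbers = [x for x in numbers if x != None]
--     return min(numbers)
--
-- def calcrouteValue(bigMap):
--     routeValue = []
--     for y in range(len(bigMap)):
--         routeValue.append([])
--         for x in range(len(bigMap[0])):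
--             tmpValue = []
--
--             if [x, y] == [0, 0]:
--                 if 1 < len(bigMap[0]):
--                     tmpValue.append(bigMap[y][x] + bigMap[y][x + 1])
--                 else:
--                     tmpValue.append(None)
--                 if 1 < len(bigMap[0]) and 1 < len(bigMap):
--                     tmpValue.append(bigMap[y][x] + 2 * bigMap[y + 1][x + 1])
--                 else:
--                     tmpValue.append(None)
--                 if 1 < len(bigMap):
--                     tmpValue.append(bigMap[y][x] + bigMap[y + 1][x])
--                 else:
--                     tmpValue.append(None)
--             else:
--                 minrouteValue = pickMinRouteValue(routeValue, y, x)
--                 #right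
--                 if x != len(bigMap[0])-1:
--                     tmpValue.append(minrouteValue + bigMap[y][x+1])
--                 else:
--                     tmpValue.append(None)
--
--                 # right down
--                 if not(y == len(bigMap)-1 or x == len(bigMap[0])-1):
--                     tmpValue.append(minrouteValue + 2 * bigMap[y+1][x+1])
--                 else:
--                     tmpValue.append(None)
--
--                 # down
--                 if y != len(bigMap)-1:
--                     tmpValue.append(minrouteValue + bigMap[y+1][x])
--                 else:
--                     tmpValue.append(None)
--
--             routeValue[y].append(tmpValue)
--     return routeValue
-- ===== SOURCE B (Python) =====
-- def calcrouteValue(bigMap):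
--     if not bigMap:
--         return []
--     rows, cols = len(bigMap), len(bigMap[0])
--     # pass 1: scalar min-cost table
--     m = []
--     for y in range(rows):
--         row = []
--         for x in range(cols):
--             if y == 0 and x == 0:
--                 row.append(bigMap[0][0])
--             else:
--                 cands = []
--                 if y > 0:
--                     cands.append(m[y - 1][x] + bigMap[y][x])
--                 if x > 0:
--                     cands.append(row[x - 1] + bigMap[y][x])
--                 if y > 0 and x > 0:
--                     cands.append(m[y - 1][x - 1] + 2 * bigMap[y][x])
--                 row.append(min(cands))
--         m.append(row)
--     # pass 2: emit the triples from the scalar table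
--     return [[[m[y][x] + bigMap[y][x + 1] if x != cols - 1 else None,
--               m[y][x] + 2 * bigMap[y + 1][x + 1] if y != rows - 1 and x != cols - 1 else None,
--               m[y][x] + bigMap[y + 1][x] if y != rows - 1 else None]
--              for x in range(cols)] for y in range(rows)]
-- ===== Notes on version B (the rewrite author's own statement) =====
-- stated objective: simpler
-- what changed: B replaces A's fused single loop (which stores Option triples and re-extracts minima from neighbours' stored triples via a None-filtering helper) by two plain passes: first a scalar min-cost DP table, then a comprehension emitting the triples from that table.
import Mathlib
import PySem

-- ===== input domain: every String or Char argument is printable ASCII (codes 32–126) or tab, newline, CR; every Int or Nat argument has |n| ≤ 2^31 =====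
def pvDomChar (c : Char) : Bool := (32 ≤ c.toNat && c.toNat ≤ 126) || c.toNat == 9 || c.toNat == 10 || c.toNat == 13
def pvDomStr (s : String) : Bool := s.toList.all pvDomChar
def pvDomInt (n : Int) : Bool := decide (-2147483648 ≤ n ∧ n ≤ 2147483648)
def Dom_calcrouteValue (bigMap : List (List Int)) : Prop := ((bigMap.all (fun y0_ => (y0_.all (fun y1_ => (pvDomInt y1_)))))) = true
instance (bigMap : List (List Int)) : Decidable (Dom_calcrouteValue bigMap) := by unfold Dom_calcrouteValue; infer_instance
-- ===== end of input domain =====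

-- B replaces A's fused loop (Option triples + None-filtering min extraction from stored triples)
-- by two plain passes: a scalar min-cost DP table, then emitting the triples from it; objective: simpler.

-- shared primitive: bigMap[y][x] for nonnegative indices; exact for in-range indices
-- (Pre_ excludes the ragged inputs on which Python raises IndexError here)
def pvGet (bigMap : List (List Int)) (y x : Nat) : Int := (bigMap.getD y []).getD x 0

-- Python's builtin min on a list of ints; [] is unreachable in both programs (min([]) raises)
def pyMin (l : List Int) : Int :=
  match l with
  | [] => 0
  | h :: t => t.foldl min h

-- ===== PORT A =====
def pickMinRouteValue (rv : List (List (List (Option Int)))) (y x : Nat) : Int :=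
  let numbers : List (Option Int) :=
    (if 0 < y then [((rv.getD (y-1) []).getD x []).getD 2 none] else []) ++
    (if 0 < x then [((rv.getD y []).getD (x-1) []).getD 0 none] else []) ++
    (if 0 < x ∧ 0 < y then [((rv.getD (y-1) []).getD (x-1) []).getD 1 none] else [])
  pyMin (numbers.filterMap id)

-- body of A's inner loop (one x step); rv carries the rows built so far, last row partial
def innerA (bigMap : List (List Int)) (rows cols y : Nat)
    (rv : List (List (List (Option Int)))) (x : Nat) : List (List (List (Option Int))) :=
  let tmpValue : List (Option Int) :=
    if x = 0 ∧ y = 0 then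
      [ (if 1 < cols then some (pvGet bigMap y x + pvGet bigMap y (x+1)) else none),
        (if 1 < cols ∧ 1 < rows then some (pvGet bigMap y x + 2 * pvGet bigMap (y+1) (x+1)) else none),
        (if 1 < rows then some (pvGet bigMap y x + pvGet bigMap (y+1) x) else none) ]
    else
      let minrouteValue := pickMinRouteValue rv y x
      [ (if x ≠ cols - 1 then some (minrouteValue + pvGet bigMap y (x+1)) else none),
        (if ¬ (y = rows - 1 ∨ x = cols - 1) then some (minrouteValue + 2 * pvGet bigMap (y+1) (x+1)) else none),
        (if y ≠ rows - 1 then some (minrouteValue + pvGet bigMap (y+1) x) else none) ]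
  rv.set y ((rv.getD y []) ++ [tmpValue])

def calcrouteValue (bigMap : List (List Int)) : List (List (List (Option Int))) :=
  let rows := bigMap.length
  let cols := (bigMap.headD []).length
  (List.range rows).foldl
    (fun rv y => (List.range cols).foldl (innerA bigMap rows cols y) (rv ++ [[]])) []

-- ===== PORT B =====
-- pass-1 step: append the min-cost of cell (y,x) to the current DP row
def dpStep (bigMap : List (List Int)) (m : List (List Int)) (y : Nat)
    (row : List Int) (x : Nat) : List Int :=
  row ++ [ if y = 0 ∧ x = 0 then pvGet bigMap 0 0
           else
             pyMin ((if 0 < y then [(m.getD (y-1) []).getD x 0 + pvGet bigMap y x] else []) ++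
                    (if 0 < x then [row.getD (x-1) 0 + pvGet bigMap y x] else []) ++
                    (if 0 < y ∧ 0 < x then [(m.getD (y-1) []).getD (x-1) 0 + 2 * pvGet bigMap y x] else [])) ]

-- pass-2: emit the triple for cell (y,x) from the scalar table m
def emit (bigMap : List (List Int)) (rows cols : Nat) (m : List (List Int)) (y x : Nat) :
    List (Option Int) :=
  let v := (m.getD y []).getD x 0
  [ (if x ≠ cols - 1 then some (v + pvGet bigMap y (x+1)) else none),
    (if y ≠ rows - 1 ∧ x ≠ cols - 1 then some (v + 2 * pvGet bigMap (y+1) (x+1)) else none),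
    (if y ≠ rows - 1 then some (v + pvGet bigMap (y+1) x) else none) ]

def calcrouteValue_alt (bigMap : List (List Int)) : List (List (List (Option Int))) :=
  match bigMap with
  | [] => []
  | r0 :: _ =>
    let rows := bigMap.length
    let cols := r0.length
    let m : List (List Int) :=
      (List.range rows).foldl
        (fun m y => m ++ [(List.range cols).foldl (dpStep bigMap m y) []]) []
    (List.range rows).map (fun y => (List.range cols).map (emit bigMap rows cols m y))

-- ===== PRECONDITION & SPEC =====
-- Pre_ excludes exactly the ragged grids on which Python A raises IndexError:
-- some row shorter than row 0 (every cell of every row up to len(bigMap[0]) is read).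
def Pre_calcrouteValue (bigMap : List (List Int)) : Prop :=
  ∀ row ∈ bigMap, (bigMap.headD []).length ≤ row.length
instance (bigMap : List (List Int)) : Decidable (Pre_calcrouteValue bigMap) := by
  unfold Pre_calcrouteValue; infer_instance
def pvWitness_calcrouteValue : List (List Int) := [[1, 2], [3, 4]]

def Spec_calcrouteValue (bigMap : List (List Int)) (out : List (List (List (Option Int)))) : Prop := out = calcrouteValue_alt bigMap
instance (bigMap : List (List Int)) (out : List (List (List (Option Int)))) : Decidable (Spec_calcrouteValue bigMap out) := by unfold Spec_calcrouteValue; infer_instance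

-- ===== CLAIM (what is proved, stated in full; the proofs are below) =====
def Claim_equal_calcrouteValue : Prop := ∀ (bigMap : List (List Int)), Dom_calcrouteValue bigMap → Pre_calcrouteValue bigMap → Spec_calcrouteValue bigMap (calcrouteValue bigMap)

-- ===== LEMMAS AND PROOFS =====

-- the min-cost of reaching cell (y,x), as a recursive function (proof-only)
def Mfun (bigMap : List (List Int)) (y x : Nat) : Int :=
  if y = 0 ∧ x = 0 then pvGet bigMap 0 0
  else
    pyMin ((if _h : 0 < y then [Mfun bigMap (y-1) x + pvGet bigMap y x] else []) ++
           (if _h : 0 < x then [Mfun bigMap y (x-1) + pvGet bigMap y x] else []) ++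
           (if _h : 0 < y ∧ 0 < x then [Mfun bigMap (y-1) (x-1) + 2 * pvGet bigMap y x] else []))
termination_by y + x
decreasing_by all_goals omega

def Mrow (bigMap : List (List Int)) (y k : Nat) : List Int :=
  (List.range k).map (Mfun bigMap y)

def Mtab (bigMap : List (List Int)) (cols r : Nat) : List (List Int) :=
  (List.range r).map (fun y => Mrow bigMap y cols)

def Tcell (bigMap : List (List Int)) (rows cols y x : Nat) : List (Option Int) :=
  [ (if x ≠ cols - 1 then some (Mfun bigMap y x + pvGet bigMap y (x+1)) else none),
    (if y ≠ rows - 1 ∧ x ≠ cols - 1 then some (Mfun bigMap y x + 2 * pvGet bigMap (y+1) (x+1)) else none),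
    (if y ≠ rows - 1 then some (Mfun bigMap y x + pvGet bigMap (y+1) x) else none) ]

def Trow (bigMap : List (List Int)) (rows cols y k : Nat) : List (List (Option Int)) :=
  (List.range k).map (Tcell bigMap rows cols y)

def Ttab (bigMap : List (List Int)) (rows cols r : Nat) : List (List (List (Option Int))) :=
  (List.range r).map (fun y => Trow bigMap rows cols y cols)

lemma getD_map_range {α : Type} (f : Nat → α) (n i : Nat) (d : α) (h : i < n) :
    ((List.range n).map f).getD i d = f i := by
  simp [List.getD_eq_getElem?_getD, List.getElem?_map, List.getElem?_range h]

lemma getD_append_lt {α : Type} (l l' : List α) (i : Nat) (d : α) (h : i < l.length) :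
    (l ++ l').getD i d = l.getD i d := by
  simp [List.getD_eq_getElem?_getD, List.getElem?_append_left h]

lemma getD_append_length {α : Type} (l : List α) (a : α) (d : α) :
    (l ++ [a]).getD l.length d = a := by
  simp [List.getD_eq_getElem?_getD]

lemma set_append_length {α : Type} (l : List α) (a b : α) :
    (l ++ [a]).set l.length b = l ++ [b] := by
  induction l with
  | nil => simp
  | cons h t ih => simp [ih]

lemma ite_not_or {α : Type} (p q : Prop) [Decidable p] [Decidable q] (a b : α) :
    (if ¬ (p ∨ q) then a else b) = (if ¬ p ∧ ¬ q then a else b) := by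
  by_cases hp : p <;> by_cases hq : q <;> simp [hp, hq]

lemma Mtab_getD (bigMap : List (List Int)) (cols r y : Nat) (h : y < r) :
    (Mtab bigMap cols r).getD y [] = Mrow bigMap y cols :=
  getD_map_range _ r y [] h

lemma Mrow_getD (bigMap : List (List Int)) (y k x : Nat) (h : x < k) :
    (Mrow bigMap y k).getD x 0 = Mfun bigMap y x :=
  getD_map_range _ k x 0 h

lemma Ttab_getD (bigMap : List (List Int)) (rows cols r y : Nat) (h : y < r) :
    (Ttab bigMap rows cols r).getD y [] = Trow bigMap rows cols y cols :=
  getD_map_range _ r y [] h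

lemma Trow_getD (bigMap : List (List Int)) (rows cols y k x : Nat) (h : x < k) :
    (Trow bigMap rows cols y k).getD x [] = Tcell bigMap rows cols y x :=
  getD_map_range _ k x [] h

lemma Tcell_getD0 (bigMap : List (List Int)) (rows cols y x : Nat) :
    (Tcell bigMap rows cols y x).getD 0 none
      = (if x ≠ cols - 1 then some (Mfun bigMap y x + pvGet bigMap y (x+1)) else none) := rfl

lemma Tcell_getD1 (bigMap : List (List Int)) (rows cols y x : Nat) :
    (Tcell bigMap rows cols y x).getD 1 none
      = (if y ≠ rows - 1 ∧ x ≠ cols - 1 then some (Mfun bigMap y x + 2 * pvGet bigMap (y+1) (x+1)) else none) := rfl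

lemma Tcell_getD2 (bigMap : List (List Int)) (rows cols y x : Nat) :
    (Tcell bigMap rows cols y x).getD 2 none
      = (if y ≠ rows - 1 then some (Mfun bigMap y x + pvGet bigMap (y+1) x) else none) := rfl

-- pickMinRouteValue, applied to the built structure, computes Mfun
lemma pick_eq_Mfun (bigMap : List (List Int)) (rows cols y x : Nat)
    (hy : y < rows) (hx : x < cols) (h0 : ¬ (x = 0 ∧ y = 0)) :
    pickMinRouteValue (Ttab bigMap rows cols y ++ [Trow bigMap rows cols y x]) y x
      = Mfun bigMap y x := by
  have hlen : (Ttab bigMap rows cols y).length = y := by simp [Ttab]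
  have hgy : (Ttab bigMap rows cols y ++ [Trow bigMap rows cols y x]).getD y []
      = Trow bigMap rows cols y x := by
    have h := getD_append_length (Ttab bigMap rows cols y) (Trow bigMap rows cols y x) []
    rwa [hlen] at h
  have hup : 0 < y → (Ttab bigMap rows cols y ++ [Trow bigMap rows cols y x]).getD (y-1) []
      = Trow bigMap rows cols (y-1) cols := by
    intro hy0
    rw [getD_append_lt _ _ _ _ (by rw [hlen]; omega),
        Ttab_getD bigMap rows cols y (y-1) (by omega)]
  unfold pickMinRouteValue
  conv_rhs => rw [Mfun]
  rw [if_neg (by tauto : ¬ (y = 0 ∧ x = 0))]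
  by_cases hy0 : 0 < y
  · by_cases hx0 : 0 < x
    · simp only [if_pos hy0, if_pos hx0, if_pos (⟨hx0, hy0⟩ : 0 < x ∧ 0 < y), hup hy0, hgy,
          dif_pos hy0, dif_pos hx0, dif_pos (⟨hy0, hx0⟩ : 0 < y ∧ 0 < x)]
      rw [Trow_getD bigMap rows cols (y-1) cols x hx,
          Trow_getD bigMap rows cols y x (x-1) (by omega),
          Trow_getD bigMap rows cols (y-1) cols (x-1) (by omega),
          Tcell_getD2, Tcell_getD0, Tcell_getD1]
      rw [if_pos (show y - 1 ≠ rows - 1 by omega),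
          if_pos (show x - 1 ≠ cols - 1 by omega),
          if_pos (⟨show y - 1 ≠ rows - 1 by omega, show x - 1 ≠ cols - 1 by omega⟩ :
            y - 1 ≠ rows - 1 ∧ x - 1 ≠ cols - 1)]
      rw [show y - 1 + 1 = y from by omega, show x - 1 + 1 = x from by omega]
      rfl
    · simp only [if_pos hy0, if_neg hx0, if_neg (by tauto : ¬ (0 < x ∧ 0 < y)), hup hy0,
          dif_pos hy0, dif_neg hx0, dif_neg (by tauto : ¬ (0 < y ∧ 0 < x))]
      rw [Trow_getD bigMap rows cols (y-1) cols x hx, Tcell_getD2,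
          if_pos (show y - 1 ≠ rows - 1 by omega),
          show y - 1 + 1 = y from by omega]
      rfl
  · by_cases hx0 : 0 < x
    · simp only [if_neg hy0, if_pos hx0, if_neg (by tauto : ¬ (0 < x ∧ 0 < y)), hgy,
          dif_neg hy0, dif_pos hx0, dif_neg (by tauto : ¬ (0 < y ∧ 0 < x))]
      rw [Trow_getD bigMap rows cols y x (x-1) (by omega), Tcell_getD0,
          if_pos (show x - 1 ≠ cols - 1 by omega),
          show x - 1 + 1 = x from by omega]
      rfl
    · exact absurd (by omega : x = 0 ∧ y = 0) h0

-- one inner A step extends the partial row with the right triple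
lemma innerA_step (bigMap : List (List Int)) (rows cols y k : Nat)
    (hy : y < rows) (hk : k < cols) :
    innerA bigMap rows cols y (Ttab bigMap rows cols y ++ [Trow bigMap rows cols y k]) k
      = Ttab bigMap rows cols y ++ [Trow bigMap rows cols y (k+1)] := by
  have hlen : (Ttab bigMap rows cols y).length = y := by simp [Ttab]
  have hgy : (Ttab bigMap rows cols y ++ [Trow bigMap rows cols y k]).getD y []
      = Trow bigMap rows cols y k := by
    have h := getD_append_length (Ttab bigMap rows cols y) (Trow bigMap rows cols y k) []
    rwa [hlen] at h
  have hset : ∀ b, (Ttab bigMap rows cols y ++ [Trow bigMap rows cols y k]).set y b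
      = Ttab bigMap rows cols y ++ [b] := by
    intro b
    have h := set_append_length (Ttab bigMap rows cols y) (Trow bigMap rows cols y k) b
    rwa [hlen] at h
  have hT : Trow bigMap rows cols y (k+1)
      = Trow bigMap rows cols y k ++ [Tcell bigMap rows cols y k] := by
    simp [Trow, List.range_succ]
  unfold innerA
  rw [hgy, hset, hT]
  congr 2
  by_cases h00 : k = 0 ∧ y = 0
  · obtain ⟨hk0, hy0⟩ := h00
    subst hk0; subst hy0
    have hM : Mfun bigMap 0 0 = pvGet bigMap 0 0 := by rw [Mfun, if_pos ⟨rfl, rfl⟩]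
    rw [if_pos ⟨rfl, rfl⟩]
    simp only [Tcell, hM]
    have hc1 : (1 < cols) ↔ (0 ≠ cols - 1) := by omega
    have hr1 : (1 < rows) ↔ (0 ≠ rows - 1) := by omega
    rw [if_congr hc1 rfl rfl,
        if_congr (by rw [hc1, hr1]; tauto : (1 < cols ∧ 1 < rows) ↔ (0 ≠ rows - 1 ∧ 0 ≠ cols - 1)) rfl rfl,
        if_congr hr1 rfl rfl]
  · rw [if_neg h00, pick_eq_Mfun bigMap rows cols y k hy hk h00]
    simp only [Tcell, ite_not_or]

lemma innerA_fold (bigMap : List (List Int)) (rows cols y : Nat) (hy : y < rows) :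
    ∀ k, k ≤ cols →
      (List.range k).foldl (innerA bigMap rows cols y) (Ttab bigMap rows cols y ++ [[]])
        = Ttab bigMap rows cols y ++ [Trow bigMap rows cols y k] := by
  intro k
  induction k with
  | zero => intro _; simp [Trow]
  | succ k ih =>
    intro hk
    rw [List.range_succ, List.foldl_append, ih (by omega)]
    simp only [List.foldl_cons, List.foldl_nil]
    exact innerA_step bigMap rows cols y k hy (by omega)

lemma outerA_fold (bigMap : List (List Int)) (rows cols : Nat) :
    ∀ r, r ≤ rows →
      (List.range r).foldl
        (fun rv y => (List.range cols).foldl (innerA bigMap rows cols y) (rv ++ [[]])) []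
        = Ttab bigMap rows cols r := by
  intro r
  induction r with
  | zero => intro _; simp [Ttab]
  | succ r ih =>
    intro hr
    rw [List.range_succ, List.foldl_append, ih (by omega)]
    simp only [List.foldl_cons, List.foldl_nil]
    rw [innerA_fold bigMap rows cols r (by omega) cols (le_refl _)]
    simp [Ttab, List.range_succ, Trow]

lemma dpStep_step (bigMap : List (List Int)) (cols y k : Nat) (hk : k < cols) :
    dpStep bigMap (Mtab bigMap cols y) y (Mrow bigMap y k) k = Mrow bigMap y (k+1) := by
  have hM : Mrow bigMap y (k+1) = Mrow bigMap y k ++ [Mfun bigMap y k] := by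
    simp [Mrow, List.range_succ]
  rw [hM]
  unfold dpStep
  congr 1
  congr 1
  by_cases h00 : y = 0 ∧ k = 0
  · rw [if_pos h00, Mfun, if_pos h00]
  · rw [if_neg h00]
    conv_rhs => rw [Mfun]
    rw [if_neg h00]
    congr 1
    by_cases hy0 : 0 < y
    · by_cases hk0 : 0 < k
      · rw [if_pos hy0, if_pos hk0, if_pos (⟨hy0, hk0⟩ : 0 < y ∧ 0 < k),
            dif_pos hy0, dif_pos hk0, dif_pos (⟨hy0, hk0⟩ : 0 < y ∧ 0 < k)]
        rw [Mtab_getD bigMap cols y (y-1) (by omega), Mrow_getD bigMap (y-1) cols k hk,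
            Mrow_getD bigMap y k (k-1) (by omega), Mrow_getD bigMap (y-1) cols (k-1) (by omega)]
      · rw [if_pos hy0, if_neg hk0, if_neg (by tauto : ¬ (0 < y ∧ 0 < k)),
            dif_pos hy0, dif_neg hk0, dif_neg (by tauto : ¬ (0 < y ∧ 0 < k))]
        rw [Mtab_getD bigMap cols y (y-1) (by omega), Mrow_getD bigMap (y-1) cols k hk]
    · by_cases hk0 : 0 < k
      · rw [if_neg hy0, if_pos hk0, if_neg (by tauto : ¬ (0 < y ∧ 0 < k)),
            dif_neg hy0, dif_pos hk0, dif_neg (by tauto : ¬ (0 < y ∧ 0 < k))]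
        rw [Mrow_getD bigMap y k (k-1) (by omega)]
      · exact absurd (by omega : y = 0 ∧ k = 0) h00

lemma dpStep_fold (bigMap : List (List Int)) (cols y : Nat) :
    ∀ k, k ≤ cols →
      (List.range k).foldl (dpStep bigMap (Mtab bigMap cols y) y) [] = Mrow bigMap y k := by
  intro k
  induction k with
  | zero => intro _; simp [Mrow]
  | succ k ih =>
    intro hk
    rw [List.range_succ, List.foldl_append, ih (by omega)]
    simp only [List.foldl_cons, List.foldl_nil]
    exact dpStep_step bigMap cols y k (by omega)

lemma outerB_fold (bigMap : List (List Int)) (cols : Nat) :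
    ∀ r, (List.range r).foldl
        (fun m y => m ++ [(List.range cols).foldl (dpStep bigMap m y) []]) []
        = Mtab bigMap cols r := by
  intro r
  induction r with
  | zero => simp [Mtab]
  | succ r ih =>
    rw [List.range_succ, List.foldl_append, ih]
    simp only [List.foldl_cons, List.foldl_nil]
    rw [dpStep_fold bigMap cols r cols (le_refl _)]
    simp [Mtab, List.range_succ]

lemma emit_eq_Tcell (bigMap : List (List Int)) (rows cols y x : Nat)
    (hy : y < rows) (hx : x < cols) :
    emit bigMap rows cols (Mtab bigMap cols rows) y x = Tcell bigMap rows cols y x := by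
  unfold emit Tcell
  rw [show (Mtab bigMap cols rows).getD y [] = Mrow bigMap y cols from
        getD_map_range _ rows y [] hy]
  rw [show (Mrow bigMap y cols).getD x 0 = Mfun bigMap y x from
        getD_map_range _ cols x 0 hx]

-- ===== VERDICT (by name: the statement is the Claim_ definition above) =====
theorem calcrouteValue_spec : Claim_equal_calcrouteValue := by
  intro bigMap _ _
  unfold Spec_calcrouteValue calcrouteValue calcrouteValue_alt
  cases bigMap with
  | nil => simp
  | cons r0 rest =>
    simp only [List.headD_cons]
    rw [outerA_fold (r0 :: rest) (r0 :: rest).length r0.length (r0 :: rest).length (le_refl _)]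
    rw [outerB_fold (r0 :: rest) r0.length (r0 :: rest).length]
    unfold Ttab
    apply List.map_congr_left
    intro y hy
    rw [List.mem_range] at hy
    unfold Trow
    apply List.map_congr_left
    intro x hx
    rw [List.mem_range] at hx
    exact (emit_eq_Tcell (r0 :: rest) _ _ y x hy hx).symm
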